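-- pv_equiv track=rewrite | github.com/tosin2013/character-music-mcp | working_universal_processor.py | _has_character_context
-- ===== SOURCE A (Python) =====
-- def _has_character_context(text: str, name: str) -> bool:
--     """Check if a name appears in character-like context"""
--     character_contexts = [
--         f"{name} said", f"{name} thought", f"{name} felt", f"{name} walked",
--         f"{name} looked", f"{name} smiled", f"{name} laughed", f"{name} cried",
--         f"{name}'s", f"{name} was", f"{name} had", f"{name} did"
--     ]
--
--     text_lower = text.lower()
--     name_lower = name.lower()
--
--     return any(context.lower() in text_lower for context in character_contexts)
-- ===== SOURCE B (Python) =====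
-- _SUFFIXES = (" said", " thought", " felt", " walked", " looked", " smiled",
--              " laughed", " cried", "'s", " was", " had", " did")
--
-- def _has_character_context(text: str, name: str) -> bool:
--     """Single position-scan: at each spot where the lowered name starts,
--     check whether one of the fixed character-phrase suffixes follows."""
--     t = text.lower()
--     n = name.lower()
--     for j in range(len(t) + 1):
--         if t.startswith(n, j) and any(t.startswith(s, j + len(n)) for s in _SUFFIXES):
--             return True
--     return False
-- ===== Notes on version B (the rewrite author's own statement) =====
-- stated objective: alternative
-- what changed: Replaces A's 12 separate whole-text substring scans (one per built phrase) by a single left-to-right position scan of the lowered text that checks, at each spot where the lowered name starts, whether one of the 12 fixed suffixes follows.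
import Mathlib
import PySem

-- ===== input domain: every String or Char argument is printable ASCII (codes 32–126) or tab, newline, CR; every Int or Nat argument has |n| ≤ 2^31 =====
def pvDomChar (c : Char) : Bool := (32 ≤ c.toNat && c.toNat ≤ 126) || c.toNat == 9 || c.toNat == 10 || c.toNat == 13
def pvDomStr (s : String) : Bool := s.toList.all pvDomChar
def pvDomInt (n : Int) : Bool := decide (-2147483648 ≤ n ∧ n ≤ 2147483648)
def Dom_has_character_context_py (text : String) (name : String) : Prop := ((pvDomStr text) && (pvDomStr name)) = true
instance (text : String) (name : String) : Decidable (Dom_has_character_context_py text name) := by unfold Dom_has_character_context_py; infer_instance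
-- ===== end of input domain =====

-- B replaces A's 12 whole-text substring scans by one position scan of the lowered text
-- checking which fixed suffix follows each occurrence of the lowered name (objective: alternative).

-- ===== PORT A =====
-- literal transliteration of A: build the 12 f-string phrases, lowercase text,
-- return any(context.lower() in text_lower); strings handled on the List Char side via PySem.Chars.
def has_character_context_py (text : String) (name : String) : Bool :=
  let nm := name.toList
  let character_contexts : List (List Char) :=
    [nm ++ (" said").toList, nm ++ (" thought").toList, nm ++ (" felt").toList, nm ++ (" walked").toList,
     nm ++ (" looked").toList, nm ++ (" smiled").toList, nm ++ (" laughed").toList, nm ++ (" cried").toList,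
     nm ++ ("'s").toList, nm ++ (" was").toList, nm ++ (" had").toList, nm ++ (" did").toList]
  let text_lower := PySem.Chars.lower text.toList
  let _name_lower := PySem.Chars.lower nm   -- A computes name_lower but never uses it
  character_contexts.any (fun context => PySem.Chars.isIn (PySem.Chars.lower context) text_lower)

-- ===== PORT B =====
def pvSuffixes : List (List Char) :=
  [(" said").toList, (" thought").toList, (" felt").toList, (" walked").toList,
   (" looked").toList, (" smiled").toList, (" laughed").toList, (" cried").toList,
   ("'s").toList, (" was").toList, (" had").toList, (" did").toList]

-- Source B's loop 'for j in range(len(t)+1)': recursion over the tails of t;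
-- t.startswith(x, j) is startswith on t.drop j — exact for the 0 ≤ j ≤ len(t) that range yields.
def pvScan (n : List Char) (rest : List Char) : Bool :=
  if PySem.Chars.startswith rest n &&
      pvSuffixes.any (fun s => PySem.Chars.startswith (List.drop n.length rest) s) then
    true
  else
    match rest with
    | [] => false
    | _ :: tl => pvScan n tl

def has_character_context_py_alt (text : String) (name : String) : Bool :=
  pvScan (PySem.Chars.lower name.toList) (PySem.Chars.lower text.toList)

-- ===== PRECONDITION & SPEC =====
def Spec_has_character_context_py (text : String) (name : String) (out : Bool) : Prop := out = has_character_context_py_alt text name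
instance (text : String) (name : String) (out : Bool) : Decidable (Spec_has_character_context_py text name out) := by unfold Spec_has_character_context_py; infer_instance

-- ===== CLAIM (what is proved, stated in full; the proofs are below) =====
def Claim_equal_has_character_context_py : Prop := ∀ (text : String) (name : String), Dom_has_character_context_py text name → Spec_has_character_context_py text name (has_character_context_py text name)

-- ===== LEMMAS AND PROOFS =====

-- lowercase distributes over ++
theorem pv_lower_append (a b : List Char) :
    PySem.Chars.lower (a ++ b) = PySem.Chars.lower a ++ PySem.Chars.lower b := by
  simp [PySem.Chars.lower]

-- splitting a prefix 'n ++ s <+: tail'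
theorem pv_append_prefix (n s tail : List Char) :
    (n ++ s) <+: tail ↔ n <+: tail ∧ s <+: tail.drop n.length := by
  constructor
  · rintro ⟨r, hr⟩
    refine ⟨⟨s ++ r, by simp [← hr]⟩, ?_⟩
    subst hr; simp
  · rintro ⟨⟨u, hu⟩, h2⟩
    obtain ⟨r, hr⟩ := h2
    subst hu; simp at hr
    exact ⟨r, by simp [← hr]⟩

-- what pvScan decides
theorem pv_scan_iff (n t : List Char) :
    pvScan n t = true ↔
      ∃ tail, tail <:+ t ∧ n <+: tail ∧
        ∃ s ∈ pvSuffixes, s <+: tail.drop n.length := by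
  induction t with
  | nil =>
      rw [pvScan]
      simp only [Bool.and_eq_true, List.any_eq_true, PySem.Chars.startswith_iff]
      constructor
      · intro h
        split at h
        · rename_i hc
          exact ⟨[], List.suffix_refl _, hc.1, by
            obtain ⟨s, hs, hp⟩ := hc.2; exact ⟨s, hs, hp⟩⟩
        · simp at h
      · rintro ⟨tail, htail, hn, s, hs, hp⟩
        rw [List.suffix_nil] at htail
        subst htail
        split
        · rfl
        · rename_i hc
          exact absurd ⟨hn, s, hs, hp⟩ hc
  | cons c tl ih =>
      rw [pvScan]
      simp only [Bool.and_eq_true, List.any_eq_true, PySem.Chars.startswith_iff]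
      constructor
      · intro h
        split at h
        · rename_i hc
          exact ⟨c :: tl, List.suffix_refl _, hc.1, hc.2⟩
        · obtain ⟨tail, htail, rest⟩ := ih.mp h
          exact ⟨tail, htail.trans (List.suffix_cons c tl), rest⟩
      · rintro ⟨tail, htail, hn, hsuf⟩
        split
        · rfl
        · rename_i hc
          rcases List.suffix_cons_iff.mp htail with h1 | h1
          · subst h1; exact absurd ⟨hn, hsuf⟩ hc
          · exact ih.mpr ⟨tail, h1, hn, hsuf⟩

-- what A decides
theorem pv_A_iff (text name : String) :
    has_character_context_py text name = true ↔
      ∃ s ∈ pvSuffixes,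
        (PySem.Chars.lower name.toList ++ s) <:+: PySem.Chars.lower text.toList := by
  unfold has_character_context_py
  simp only [List.any_cons, List.any_nil, Bool.or_eq_true, Bool.or_false,
    PySem.Chars.isIn_iff_infix, pv_lower_append, pvSuffixes, List.mem_cons,
    List.not_mem_nil, or_false, exists_eq_or_imp, exists_eq_left]
  rw [show PySem.Chars.lower (" said").toList = (" said").toList from by decide,
      show PySem.Chars.lower (" thought").toList = (" thought").toList from by decide,
      show PySem.Chars.lower (" felt").toList = (" felt").toList from by decide,
      show PySem.Chars.lower (" walked").toList = (" walked").toList from by decide,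
      show PySem.Chars.lower (" looked").toList = (" looked").toList from by decide,
      show PySem.Chars.lower (" smiled").toList = (" smiled").toList from by decide,
      show PySem.Chars.lower (" laughed").toList = (" laughed").toList from by decide,
      show PySem.Chars.lower (" cried").toList = (" cried").toList from by decide,
      show PySem.Chars.lower ("'s").toList = ("'s").toList from by decide,
      show PySem.Chars.lower (" was").toList = (" was").toList from by decide,
      show PySem.Chars.lower (" had").toList = (" had").toList from by decide,
      show PySem.Chars.lower (" did").toList = (" did").toList from by decide]

-- ===== VERDICT (by name: the statement is the Claim_ definition above) =====
theorem has_character_context_py_spec : Claim_equal_has_character_context_py := by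
  intro text name _
  unfold Spec_has_character_context_py
  rw [Bool.eq_iff_iff, pv_A_iff]
  unfold has_character_context_py_alt
  rw [pv_scan_iff]
  constructor
  · rintro ⟨s, hs, hinf⟩
    obtain ⟨tail, hpre, hsuf⟩ := List.infix_iff_prefix_suffix.mp hinf
    obtain ⟨hn, hdrop⟩ := (pv_append_prefix _ _ _).mp hpre
    exact ⟨tail, hsuf, hn, s, hs, hdrop⟩
  · rintro ⟨tail, hsuf, hn, s, hs, hdrop⟩
    exact ⟨s, hs, List.infix_iff_prefix_suffix.mpr
      ⟨tail, (pv_append_prefix _ _ _).mpr ⟨hn, hdrop⟩, hsuf⟩⟩
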